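-- pv_equiv track=rewrite | github.com/stuphos/os | stuphos/stuphlib/dblib.py | ASCIIFlagDecode
-- ===== SOURCE A (Python) =====
-- def ASCIIFlagDecode(flagstr):
--     """Return packed integer bitvector representation of flag string as used in Circle MUD.
--
--     bitvector_t asciiflag_conv(char *flag)
--     {
--           bitvector_t flags = 0;
--           int is_num = TRUE;
--           char *p;
--
--           for (p = flag; *p; p++) {
--             if (islower(*p))
--               flags |= 1 << (*p - 'a');
--             else if (isupper(*p))
--               flags |= 1 << (26 + (*p - 'A'));
--
--             if (!isdigit(*p))
--               is_num = FALSE;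
--           }
--
--           if (is_num)
--             flags = atol(flag);
--
--           return (flags);
--     }
--     """
--
--     # Start bitvector value buffer at 0
--     # For each character, set the nth bit, where n is:
--     #    For lowercase characters, n is the offset into the alphabet (zero-based)
--     #    For the uppercase, n is is the offset into the alphabet (zero-based), plus 26
--     # (This makes valid bit-chars: a-zA-F)
--     # Ignore all other characters
--     # If all characters are digits, convert to long and that's the result
--     # Otherwise, char-to-bit conversion is done, the value buffer is the result
--
--     lowndx='abcdefghijklmnopqrstuvwxyz'.find # Find is faster: skips 1 instruction
--     highndx='ABCDEF'.find
--
--     bits=0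
--     numval=None # Need three values here
--
--     for c in flagstr:
--         if c.islower():
--             bits|=1<<lowndx(c) # Guaranteed
--         elif c.isupper():
--             i=highndx(c)
--             if i>-1:
--                 bits|=1<<(i+26) # Use long to suppress signage warning
--
--         if not c.isdigit():
--             numval=False
--         elif numval is None:
--             numval=True # Only occurs when there is at least a single digit
--
--     if bool(numval): # False if None (no characters)
--         return int(flagstr)
--
--     return bits
-- ===== SOURCE B (Python) =====
-- def ASCIIFlagDecode(flagstr):
--     # Different algorithm: all-digits early return, then iterate over the 32-letter
--     # bit alphabet (not over the input), summing 2**i for each letter present.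
--     if flagstr.isdigit():
--         return int(flagstr)
--     present = set(flagstr)
--     total = 0
--     for i, ch in enumerate('abcdefghijklmnopqrstuvwxyzABCDEF'):
--         if ch in present:
--             total += 1 << i
--     return total
-- ===== Notes on version B (the rewrite author's own statement) =====
-- stated objective: faster
-- what changed: B decides the all-digits case up front with str.isdigit/int, then instead of scanning the input and OR-ing bits per character it builds a set of the input's characters once and iterates over the fixed 32-letter bit alphabet (the lowercase letters followed by the first six uppercase letters), summing 2**i for each alphabet letter present in the set.
import Mathlib
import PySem

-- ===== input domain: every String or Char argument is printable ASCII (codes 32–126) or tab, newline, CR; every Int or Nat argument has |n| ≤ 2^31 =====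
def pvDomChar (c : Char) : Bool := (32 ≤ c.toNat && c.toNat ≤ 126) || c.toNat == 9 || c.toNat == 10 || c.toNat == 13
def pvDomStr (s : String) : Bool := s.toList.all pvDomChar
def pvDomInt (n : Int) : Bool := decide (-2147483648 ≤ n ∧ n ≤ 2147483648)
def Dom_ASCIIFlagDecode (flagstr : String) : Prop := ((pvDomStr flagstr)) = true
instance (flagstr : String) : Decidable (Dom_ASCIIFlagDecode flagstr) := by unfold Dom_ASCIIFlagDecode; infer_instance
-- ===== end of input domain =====

-- B decides the all-digits case up front, then iterates over the fixed 32-letter bit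
-- alphabet testing membership in a set of the input's characters, instead of scanning
-- the input and OR-ing per-character bits (measured faster by a constant factor).

-- ===== PORT A =====
-- A's per-character loop body: state is (bits, numval)
def pvStepA (st : Int × Option Bool) (c : Char) : Int × Option Bool :=
  let bits :=
    if PySem.Chars.islower c then
      PySem.Int.bor st.1 ((1 : Int) <<< (PySem.Chars.find "abcdefghijklmnopqrstuvwxyz".toList [c]).toNat)
    else if PySem.Chars.isupper c then
      let i := PySem.Chars.find "ABCDEF".toList [c]
      if i > -1 then PySem.Int.bor st.1 ((1 : Int) <<< (i + 26).toNat) else st.1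
    else st.1
  let numval := if ¬ (PySem.Chars.isdigit c = true) then some false
                else if st.2 = none then some true else st.2
  (bits, numval)

def ASCIIFlagDecode (flagstr : String) : Int :=
  let st := flagstr.toList.foldl pvStepA (0, none)
  if st.2.getD false then
    -- int(flagstr): only reached when flagstr is nonempty all-digits, where parsing succeeds
    (PySem.Int.ofStr? flagstr).getD 0
  else st.1

-- ===== PORT B =====
-- the fixed bit alphabet 'abcdefghijklmnopqrstuvwxyzABCDEF'
def pvAlpha : List Char := "abcdefghijklmnopqrstuvwxyzABCDEF".toList

-- B's loop body over enumerate(alphabet): add 2**i when the letter is in the input's set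
def pvStepB (present : PySem.Set Char) (total : Int) (p : Int × Char) : Int :=
  if p.2 ∈ present then total + (1 : Int) <<< p.1.toNat else total

def ASCIIFlagDecode_alt (flagstr : String) : Int :=
  if PySem.Str.strIsdigit flagstr then (PySem.Int.ofStr? flagstr).getD 0
  else
    let present : PySem.Set Char := PySem.Set.ofList flagstr.toList
    (PySem.List.enumerate pvAlpha 0).foldl (pvStepB present) 0

-- ===== PRECONDITION & SPEC =====
def Spec_ASCIIFlagDecode (flagstr : String) (out : Int) : Prop := out = ASCIIFlagDecode_alt flagstr
instance (flagstr : String) (out : Int) : Decidable (Spec_ASCIIFlagDecode flagstr out) := by unfold Spec_ASCIIFlagDecode; infer_instance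

-- ===== CLAIM (what is proved, stated in full; the proofs are below) =====
def Claim_equal_ASCIIFlagDecode : Prop := ∀ (flagstr : String), Dom_ASCIIFlagDecode flagstr → Spec_ASCIIFlagDecode flagstr (ASCIIFlagDecode flagstr)

-- ===== LEMMAS AND PROOFS =====

-- the bits component of A's loop body, alone
def pvBitsA (bits : Int) (c : Char) : Int :=
  if PySem.Chars.islower c then
    PySem.Int.bor bits ((1 : Int) <<< (PySem.Chars.find "abcdefghijklmnopqrstuvwxyz".toList [c]).toNat)
  else if PySem.Chars.isupper c then
    let i := PySem.Chars.find "ABCDEF".toList [c]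
    if i > -1 then PySem.Int.bor bits ((1 : Int) <<< (i + 26).toNat) else bits
  else bits

-- the numval component of A's loop body, alone
def pvNumA (v : Option Bool) (c : Char) : Option Bool :=
  if ¬ (PySem.Chars.isdigit c = true) then some false
  else if v = none then some true else v

theorem pvStepA_prod (cs : List Char) (b : Int) (v : Option Bool) :
    cs.foldl pvStepA (b, v) = (cs.foldl pvBitsA b, cs.foldl pvNumA v) := by
  have h : pvStepA = fun (st : Int × Option Bool) c => (pvBitsA st.1 c, pvNumA st.2 c) := by
    funext st c; rfl
  rw [h]; exact PySem.List.foldl_prod_mk pvBitsA pvNumA cs b v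

-- find over the literal alphabet strings, on the relevant character ranges
theorem pvFindLow (n : Nat) (h1 : 97 ≤ n) (h2 : n ≤ 122) :
    PySem.Chars.find "abcdefghijklmnopqrstuvwxyz".toList [Char.ofNat n] = (n : Int) - 97 := by
  interval_cases n <;> decide

theorem pvFindHigh (n : Nat) (h1 : 65 ≤ n) (h2 : n ≤ 70) :
    PySem.Chars.find "ABCDEF".toList [Char.ofNat n] = (n : Int) - 65 := by
  interval_cases n <;> decide

theorem pvFindHighNone (n : Nat) (h1 : 71 ≤ n) (h2 : n ≤ 90) :
    PySem.Chars.find "ABCDEF".toList [Char.ofNat n] = -1 := by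
  interval_cases n <;> decide

-- once numval is `some false`, it stays `some false`
theorem pvNumA_false (cs : List Char) : cs.foldl pvNumA (some false) = some false := by
  induction cs with
  | nil => rfl
  | cons c cs ih =>
    have hstep : pvNumA (some false) c = some false := by simp [pvNumA]
    rw [List.foldl_cons, hstep, ih]

-- from `some true`, numval tracks "all remaining chars are digits"
theorem pvNumA_true (cs : List Char) :
    cs.foldl pvNumA (some true) = some (cs.all PySem.Chars.isdigit) := by
  induction cs with
  | nil => rfl
  | cons c cs ih =>
    simp only [List.foldl_cons, List.all_cons, pvNumA]
    by_cases h : PySem.Chars.isdigit c = true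
    · simp [h, ih]
    · simp only [Bool.not_eq_true] at h
      simp [h, pvNumA_false]

-- A's numval flag computes exactly str.isdigit
theorem pvNumA_char (cs : List Char) :
    (cs.foldl pvNumA none).getD false = PySem.Chars.strIsdigit cs := by
  cases cs with
  | nil => rfl
  | cons c cs =>
    simp only [List.foldl_cons, pvNumA, PySem.Chars.strIsdigit, List.isEmpty_cons,
      Bool.not_false, Bool.true_and, List.all_cons]
    by_cases h : PySem.Chars.isdigit c = true
    · simp [h, pvNumA_true]
    · simp only [Bool.not_eq_true] at h
      simp [h, pvNumA_false]

-- two equal chars from equal code points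
theorem pvCharEq (c d : Char) (h : c.toNat = d.toNat) : c = d := Char.ext (UInt32.toNat_inj.mp h)

theorem pvOneShift (k : Nat) : (1 : Int) <<< k = ((2 ^ k : Nat) : Int) := by
  rw [Int.shiftLeft_eq]; push_cast; ring

-- the single bit A's loop body contributes for the character c, as a Nat
def pvMask (c : Char) : Nat :=
  if 'a' ≤ c ∧ c ≤ 'z' then 2 ^ (c.toNat - 97)
  else if 'A' ≤ c ∧ c ≤ 'F' then 2 ^ (c.toNat - 65 + 26)
  else 0

theorem pvBitsA_nat (b : Nat) (c : Char) : pvBitsA (b : Int) c = ((b ||| pvMask c : Nat) : Int) := by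
  unfold pvBitsA pvMask PySem.Chars.islower PySem.Chars.isupper
  by_cases hl : 'a' ≤ c ∧ c ≤ 'z'
  · have hn1 : 97 ≤ c.toNat := hl.1
    have hn2 : c.toNat ≤ 122 := hl.2
    have e := pvFindLow c.toNat hn1 hn2
    rw [Char.ofNat_toNat] at e
    rw [if_pos (by simp [hl.1, hl.2]), if_pos hl, e]
    have ht : ((c.toNat : Int) - 97).toNat = c.toNat - 97 := by omega
    rw [ht, pvOneShift]
    exact PySem.Int.bor_natCast b _
  · rw [if_neg (by simpa using hl), if_neg hl]
    by_cases hu : 'A' ≤ c ∧ c ≤ 'Z'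
    · rw [if_pos (by simp [hu.1, hu.2])]
      have hn1 : 65 ≤ c.toNat := hu.1
      have hn2 : c.toNat ≤ 90 := hu.2
      by_cases hf : c.toNat ≤ 70
      · have e := pvFindHigh c.toNat hn1 hf
        rw [Char.ofNat_toNat] at e
        have hF : c ≤ 'F' := hf
        rw [e, if_pos (by omega), if_pos ⟨hu.1, hF⟩]
        have ht : ((c.toNat : Int) - 65 + 26).toNat = c.toNat - 65 + 26 := by omega
        rw [ht, pvOneShift]
        exact PySem.Int.bor_natCast b _
      · have e := pvFindHighNone c.toNat (by omega) hn2
        rw [Char.ofNat_toNat] at e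
        rw [e, if_neg (by omega), if_neg (by intro hc; exact hf hc.2)]
        simp
    · rw [if_neg (by simpa using hu), if_neg (by intro hc; exact hu ⟨hc.1, le_trans hc.2 (by decide)⟩)]
      simp

-- A's bits loop, as a Nat fold of ORs
theorem pvFoldA_nat (cs : List Char) : ∀ (b : Nat),
    cs.foldl pvBitsA (b : Int) = ((cs.foldl (fun a c => a ||| pvMask c) b : Nat) : Int) := by
  induction cs with
  | nil => intro b; rfl
  | cons c cs ih => intro b; rw [List.foldl_cons, pvBitsA_nat, ih, List.foldl_cons]

theorem pvTestA (cs : List Char) : ∀ (b : Nat) (i : Nat),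
    (cs.foldl (fun a c => a ||| pvMask c) b).testBit i
      = (b.testBit i || cs.any fun c => (pvMask c).testBit i) := by
  induction cs with
  | nil => intro b i; simp
  | cons c cs ih =>
    intro b i
    rw [List.foldl_cons, ih, Nat.testBit_or]
    simp [Bool.or_assoc]

-- code point of the i-th alphabet letter
theorem pvAlphaVal (i : Nat) (h : i < 32) :
    (pvAlpha.getD i ' ').toNat = if i < 26 then i + 97 else i + 39 := by
  interval_cases i <;> decide

-- A's mask has exactly the bit of the alphabet letter the character is
theorem pvMask_testBit (c : Char) (i : Nat) :
    (pvMask c).testBit i = decide (i < 32 ∧ c = pvAlpha.getD i ' ') := by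
  unfold pvMask
  split_ifs with h1 h2
  · rw [Nat.testBit_two_pow, decide_eq_decide]
    have hn1 : 97 ≤ c.toNat := h1.1
    have hn2 : c.toNat ≤ 122 := h1.2
    constructor
    · intro hk
      refine ⟨by omega, pvCharEq _ _ ?_⟩
      rw [pvAlphaVal i (by omega), if_pos (by omega)]
      omega
    · rintro ⟨hi, rfl⟩
      have := pvAlphaVal i hi
      by_cases h26 : i < 26
      · rw [if_pos h26] at this; omega
      · rw [if_neg h26] at this; omega
  · rw [Nat.testBit_two_pow, decide_eq_decide]
    have hn1 : 65 ≤ c.toNat := h2.1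
    have hn2 : c.toNat ≤ 70 := h2.2
    constructor
    · intro hk
      refine ⟨by omega, pvCharEq _ _ ?_⟩
      rw [pvAlphaVal i (by omega), if_neg (by omega)]
      omega
    · rintro ⟨hi, rfl⟩
      have := pvAlphaVal i hi
      by_cases h26 : i < 26
      · rw [if_pos h26] at this; omega
      · rw [if_neg h26] at this; omega
  · rw [Nat.zero_testBit]
    symm
    rw [decide_eq_false_iff_not]
    rintro ⟨hi, rfl⟩
    interval_cases i <;> first | exact h1 (by decide) | exact h2 (by decide)

-- binary encoding of which alphabet letters satisfy p, little-endian
def pvEnc (p : Char → Bool) : List Char → Nat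
  | [] => 0
  | c :: l => (if p c then 1 else 0) + 2 * pvEnc p l

-- B's enumerate loop computes pvEnc, shifted by the start index
theorem pvEncFold (present : PySem.Set Char) (l : List Char) : ∀ (s : Nat) (t : Int),
    (PySem.List.enumerate l (s : Int)).foldl (pvStepB present) t
      = t + ((2 ^ s * pvEnc (fun c => decide (c ∈ present)) l : Nat) : Int) := by
  induction l with
  | nil => intro s t; simp [pvEnc, PySem.List.enumerate_nil]
  | cons c l ih =>
    intro s t
    rw [PySem.List.enumerate_cons, List.foldl_cons]
    have hc : ((s : Int) + 1) = ((s + 1 : Nat) : Int) := by push_cast; ring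
    rw [show pvStepB present t ((s : Int), c)
          = if c ∈ present then t + (1 : Int) <<< (s : Int).toNat else t from rfl]
    rw [hc, ih (s + 1)]
    by_cases hm : c ∈ present
    · rw [if_pos hm]
      simp only [pvEnc, hm, decide_true, if_pos]
      rw [Int.toNat_natCast, pvOneShift]
      push_cast
      ring
    · rw [if_neg hm]
      simp only [pvEnc, hm, decide_false]
      push_cast
      ring

theorem pvEnc_testBit (p : Char → Bool) (l : List Char) : ∀ (i : Nat),
    (pvEnc p l).testBit i = (decide (i < l.length) && p (l.getD i ' ')) := by
  induction l with
  | nil => intro i; simp [pvEnc, Nat.zero_testBit]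
  | cons c l ih =>
    intro i
    cases i with
    | zero =>
      rw [Nat.testBit_zero]
      by_cases h : p c <;> simp [pvEnc, h, Nat.add_mul_mod_self_left]
    | succ i =>
      rw [Nat.testBit_add_one]
      rw [show pvEnc p (c :: l) = (if p c then 1 else 0) + 2 * pvEnc p l from rfl]
      have hdiv : ((if p c then 1 else 0) + 2 * pvEnc p l) / 2 = pvEnc p l := by
        by_cases h : p c <;> simp [h] <;> omega
      rw [hdiv, ih i]
      simp

-- the heart: A's bit loop over the input = B's sum over the alphabet
theorem pvBits_eq (cs : List Char) :
    cs.foldl pvBitsA 0 = (PySem.List.enumerate pvAlpha (0 : Int)).foldl (pvStepB (PySem.Set.ofList cs)) 0 := by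
  have hA : cs.foldl pvBitsA 0 = ((cs.foldl (fun a c => a ||| pvMask c) 0 : Nat) : Int) := by
    have h0 := pvFoldA_nat cs 0
    simp only [Nat.cast_zero] at h0
    exact h0
  have hB : (PySem.List.enumerate pvAlpha (0 : Int)).foldl (pvStepB (PySem.Set.ofList cs)) 0
      = ((pvEnc (fun c => decide (c ∈ PySem.Set.ofList cs)) pvAlpha : Nat) : Int) := by
    have h0 := pvEncFold (PySem.Set.ofList cs) pvAlpha 0 0
    simp only [Nat.cast_zero, pow_zero, one_mul, zero_add] at h0
    exact h0
  rw [hA, hB, Nat.cast_inj]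
  apply Nat.eq_of_testBit_eq
  intro i
  rw [pvTestA cs 0 i, pvEnc_testBit]
  simp only [Nat.zero_testBit, Bool.false_or, pvMask_testBit]
  have hlen : pvAlpha.length = 32 := by decide
  rw [hlen, Bool.eq_iff_iff, List.any_eq_true, Bool.and_eq_true]
  simp only [decide_eq_true_iff]
  constructor
  · rintro ⟨c, hc, hi32, rfl⟩
    exact ⟨hi32, (PySem.Set.mem_ofList cs _).mpr hc⟩
  · rintro ⟨hi32, hmem⟩
    exact ⟨pvAlpha.getD i ' ', (PySem.Set.mem_ofList cs _).mp hmem, hi32, rfl⟩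

-- ===== VERDICT (by name: the statement is the Claim_ definition above) =====
theorem ASCIIFlagDecode_spec : Claim_equal_ASCIIFlagDecode := by
  intro flagstr _
  unfold Spec_ASCIIFlagDecode ASCIIFlagDecode ASCIIFlagDecode_alt
  rw [pvStepA_prod, PySem.Str.strIsdigit_eq]
  simp only [← pvNumA_char flagstr.toList]
  by_cases h : (flagstr.toList.foldl pvNumA none).getD false = true
  · rw [if_pos h, if_pos h]
  · rw [if_neg h, if_neg h]
    exact pvBits_eq flagstr.toList
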